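-- pv_equiv track=rewrite | github.com/tao3k/python-lang-project-harness | src/python_lang_project_harness/_agent_namespace.py | _first_repeated_namespace_segment
-- ===== SOURCE A (Python) =====
-- def _first_repeated_namespace_segment(
--     namespace: tuple[str, ...],
-- ) -> tuple[str, tuple[str, ...]] | None:
--     seen: dict[str, int] = {}
--     for index, segment in enumerate(namespace):
--         previous_index = seen.setdefault(segment, index)
--         if previous_index == index:
--             continue
--         return segment, namespace[: index + 1]
--     return None
-- ===== SOURCE B (Python) =====
-- def _first_repeated_namespace_segment(namespace):
--     # Value-major two-stage algorithm: for every distinct segment compute its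
--     # second-occurrence position (if any), then take the smallest such position.
--     candidates = []
--     for seg in dict.fromkeys(namespace):
--         first = namespace.index(seg)
--         rest = namespace[first + 1:]
--         if seg in rest:
--             candidates.append(first + 1 + rest.index(seg))
--     if not candidates:
--         return None
--     j = min(candidates)
--     return namespace[j], namespace[: j + 1]
-- ===== Notes on version B (the rewrite author's own statement) =====
-- stated objective: alternative
-- what changed: Replaces A's single left-to-right scan with a seen-dict and early return by a value-major two-stage algorithm: for each distinct segment (dict.fromkeys) compute its second-occurrence position via index/slicing, then take the minimum of those positions and rebuild the answer from it.
import Mathlib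
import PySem

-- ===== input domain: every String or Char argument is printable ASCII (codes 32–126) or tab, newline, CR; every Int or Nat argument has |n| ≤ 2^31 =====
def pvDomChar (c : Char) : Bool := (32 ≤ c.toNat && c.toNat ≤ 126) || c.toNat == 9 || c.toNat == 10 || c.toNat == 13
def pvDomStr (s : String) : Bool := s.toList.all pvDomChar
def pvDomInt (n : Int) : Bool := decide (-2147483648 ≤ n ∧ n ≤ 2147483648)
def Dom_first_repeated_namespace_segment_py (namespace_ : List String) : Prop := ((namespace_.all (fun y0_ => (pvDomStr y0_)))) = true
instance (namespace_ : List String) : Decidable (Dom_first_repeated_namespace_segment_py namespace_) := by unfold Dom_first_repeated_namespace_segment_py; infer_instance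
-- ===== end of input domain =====

-- B replaces A's single scan + seen-dict by a value-major two-stage algorithm
-- (second occurrence per distinct segment, then the minimum); alternative, not faster.

-- ===== PORT A =====
-- the for-loop of A: 'seen' dict, running index, remaining segments
def pvGoA (full : List String) (seen : PySem.Dict String Int) (i : Nat) : List String → Option (String × List String)
  | [] => none
  | s :: rest =>
    -- previous_index = seen.setdefault(segment, index)
    match seen.get? s with
    | some p =>
      if p == (i : Int) then pvGoA full seen (i + 1) rest
      else some (s, PySem.List.slice full none (some ((i : Int) + 1)))
    | none =>
      if (i : Int) == (i : Int) then pvGoA full (seen.insert s (i : Int)) (i + 1) rest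
      else some (s, PySem.List.slice full none (some ((i : Int) + 1)))

def first_repeated_namespace_segment_py (namespace_ : List String) : Option (String × List String) :=
  pvGoA namespace_ PySem.Dict.empty 0 namespace_

-- ===== PORT B =====
-- second-occurrence position of seg in ns (first = ns.index(seg); rest = ns[first+1:]; seg in rest → first+1+rest.index(seg))
def pvSecondOcc (ns : List String) (seg : String) : Option Nat :=
  match PySem.List.index? ns seg with
  | none => none              -- unreachable: seg is drawn from dict.fromkeys(ns)
  | some first =>
    -- rest = ns[first+1:]
    match PySem.List.index? (PySem.List.slice ns (some ((first : Int) + 1)) none) seg with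
    | none => none            -- 'seg in rest' is False: no candidate appended
    | some k => some (first + 1 + k)

def first_repeated_namespace_segment_py_alt (namespace_ : List String) : Option (String × List String) :=
  let candidates := (PySem.List.dedup namespace_).filterMap (pvSecondOcc namespace_)
  match PySem.List.min? candidates (fun x => x) with
  | none => none
  | some j =>
    match PySem.List.pyGet? namespace_ (j : Int) with
    | none => none            -- unreachable: j is a valid index
    | some seg => some (seg, PySem.List.slice namespace_ none (some ((j : Int) + 1)))

-- ===== PRECONDITION & SPEC =====
def Spec_first_repeated_namespace_segment_py (namespace_ : List String) (out : Option (String × List String)) : Prop := out = first_repeated_namespace_segment_py_alt namespace_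
instance (namespace_ : List String) (out : Option (String × List String)) : Decidable (Spec_first_repeated_namespace_segment_py namespace_ out) := by unfold Spec_first_repeated_namespace_segment_py; infer_instance

-- ===== CLAIM (what is proved, stated in full; the proofs are below) =====
def Claim_equal_first_repeated_namespace_segment_py : Prop := ∀ (namespace_ : List String), Dom_first_repeated_namespace_segment_py namespace_ → Spec_first_repeated_namespace_segment_py namespace_ (first_repeated_namespace_segment_py namespace_)

-- ===== LEMMAS AND PROOFS =====

-- 'j is a repeat position of full': an equal segment occurs strictly earlier
def pvRep (full : List String) (j : Nat) : Prop :=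
  j < full.length ∧ ∃ i, i < j ∧ full[i]? = full[j]?

-- proof-side rendering of the naive first-repeat scan
def pvScan (full : List String) (i : Nat) : List String → Option (String × List String)
  | [] => none
  | s :: rest =>
    if s ∈ full.take i then some (s, PySem.List.slice full none (some ((i : Int) + 1)))
    else pvScan full (i + 1) rest

theorem pvGoA_eq_pvScan (full : List String) (l : List String) :
    ∀ (i : Nat) (seen : PySem.Dict String Int),
      full.take i ++ l = full →
      (∀ s, ((seen.get? s).isSome = true) ↔ s ∈ full.take i) →
      (∀ s p, seen.get? s = some p → p < (i : Int)) →
      pvGoA full seen i l = pvScan full i l := by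
  induction l with
  | nil => intro i seen _ _ _; rfl
  | cons s l ih =>
    intro i seen h1 h2 h3
    rw [pvGoA, pvScan]
    cases hget : seen.get? s with
    | some p =>
      have hne : (p == (i : Int)) = false := by
        simpa using Int.ne_of_lt (h3 s p hget)
      have hmem : s ∈ full.take i := (h2 s).mp (by rw [hget]; rfl)
      simp [hne, hmem]
    | none =>
      have hmem : s ∉ full.take i := by
        intro hm
        have := (h2 s).mpr hm
        rw [hget] at this; simp at this
      have hlen : (full.take i).length = i := by
        have hc := congrArg List.length h1
        simp [List.length_take] at hc ⊢
        omega
      have hg : full[i]? = some s := by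
        conv_lhs => rw [← h1]
        rw [List.getElem?_append_right (by omega)]
        simp [hlen]
      have hs1 : full.take (i + 1) = full.take i ++ [s] := by
        rw [List.take_add_one, hg]; rfl
      simp only [beq_self_eq_true, if_true, hmem, if_false]
      apply ih (i + 1) (seen.insert s (i : Int))
      · rw [hs1]; simpa using h1
      · intro s'
        rw [PySem.Dict.get?_insert]
        by_cases hss : s' = s
        · simp [hss, hs1]
        · simp only [if_neg hss, hs1, List.mem_append, List.mem_singleton]
          rw [h2 s']
          simp [hss]
      · intro s' p hp
        rw [PySem.Dict.get?_insert] at hp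
        by_cases hss : s' = s
        · rw [if_pos hss] at hp
          cases hp; omega
        · rw [if_neg hss] at hp
          have := h3 s' p hp
          omega

theorem mem_take_iff (full : List String) (j : Nat) (s : String) :
    s ∈ full.take j ↔ ∃ i, i < j ∧ full[i]? = some s := by
  constructor
  · intro h
    obtain ⟨i, hi, hget⟩ := List.getElem_of_mem h
    refine ⟨i, ?_, ?_⟩
    · have := hi; simp [List.length_take] at this; omega
    · rw [List.getElem?_eq_getElem (by have := hi; simp [List.length_take] at this; omega)]
      rw [← hget, List.getElem_take]
  · rintro ⟨i, hij, hget⟩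
    have hlt : i < full.length := (List.getElem?_eq_some_iff.mp hget).1
    have : full[i] = s := by
      have := List.getElem?_eq_getElem hlt
      rw [hget] at this; exact (Option.some.inj this).symm
    rw [← this]
    exact List.mem_take_iff_getElem.mpr ⟨i, by omega, rfl⟩

-- pvScan finds exactly the minimal repeat position
theorem pvScan_none (full l : List String) (i : Nat)
    (h1 : full.take i ++ l = full) (h2 : ∀ j, i ≤ j → ¬ pvRep full j) :
    pvScan full i l = none := by
  induction l generalizing i with
  | nil => rfl
  | cons s rest ih =>
    have hlen : (full.take i).length = i := by
      have hc := congrArg List.length h1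
      simp [List.length_take] at hc ⊢
      omega
    have hg : full[i]? = some s := by
      conv_lhs => rw [← h1]
      rw [List.getElem?_append_right (by omega)]
      simp [hlen]
    have hilt : i < full.length := by
      have hc := congrArg List.length h1
      simp at hc; omega
    have hmem : s ∉ full.take i := by
      intro hm
      obtain ⟨i', hi', hget⟩ := (mem_take_iff full i s).mp hm
      exact h2 i (le_refl i) ⟨hilt, i', hi', by rw [hget, hg]⟩
    rw [pvScan, if_neg hmem]
    refine ih (i + 1) ?_ ?_
    · rw [List.take_add_one, hg]
      simpa using h1
    · intro j hj; exact h2 j (by omega)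

theorem pvScan_some (full l : List String) (i j : Nat) (hj : j < full.length)
    (h1 : full.take i ++ l = full) (hij : i ≤ j) (hrep : pvRep full j)
    (hmin : ∀ m, i ≤ m → m < j → ¬ pvRep full m) :
    pvScan full i l = some (full[j], full.take (j + 1)) := by
  induction l generalizing i with
  | nil =>
    exfalso
    have hc := congrArg List.length h1
    simp [List.length_take] at hc
    omega
  | cons s rest ih =>
    have hlen : (full.take i).length = i := by
      have hc := congrArg List.length h1
      simp [List.length_take] at hc ⊢
      omega
    have hg : full[i]? = some s := by
      conv_lhs => rw [← h1]
      rw [List.getElem?_append_right (by omega)]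
      simp [hlen]
    have hilt : i < full.length := by
      have hc := congrArg List.length h1
      simp at hc; omega
    by_cases hij' : i = j
    · subst hij'
      have hmem : s ∈ full.take i := by
        obtain ⟨_, i', hi', hget⟩ := hrep
        exact (mem_take_iff full i s).mpr ⟨i', hi', by rw [hget, hg]⟩
      rw [pvScan, if_pos hmem]
      have hfj : full[i] = s := by
        have := List.getElem?_eq_getElem hilt
        rw [hg] at this; exact (Option.some.inj this).symm
      have hslice : PySem.List.slice full none (some ((i : Int) + 1)) = full.take (i + 1) := by
        have : ((i : Int) + 1) = ((i + 1 : Nat) : Int) := by push_cast; ring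
        rw [this, PySem.List.slice_to_natCast]
      rw [hslice, hfj]
    · have hmem : s ∉ full.take i := by
        intro hm
        obtain ⟨i', hi', hget⟩ := (mem_take_iff full i s).mp hm
        exact hmin i (le_refl i) (by omega) ⟨hilt, i', hi', by rw [hget, hg]⟩
      rw [pvScan, if_neg hmem]
      refine ih (i + 1) ?_ (by omega) ?_
      · rw [List.take_add_one, hg]
        simpa using h1
      · intro m hm hmj; exact hmin m (by omega) hmj

-- the slice ns[first+1:] of B is List.drop (first+1)
theorem slice_succ_drop (ns : List String) (first : Nat) :
    PySem.List.slice ns (some ((first : Int) + 1)) none = ns.drop (first + 1) := by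
  have : ((first : Int) + 1) = ((first + 1 : Nat) : Int) := by push_cast; ring
  rw [this, PySem.List.slice_from_natCast]

-- every candidate of B is a repeat position
theorem cand_rep (ns : List String) (seg : String) (c : Nat)
    (h : pvSecondOcc ns seg = some c) : pvRep ns c := by
  unfold pvSecondOcc at h
  cases hf : PySem.List.index? ns seg with
  | none => rw [hf] at h; cases h
  | some first =>
    simp only [hf, slice_succ_drop] at h
    cases hk : PySem.List.index? (ns.drop (first + 1)) seg with
    | none => rw [hk] at h; cases h
    | some k =>
      rw [hk] at h
      have hc : c = first + 1 + k := (Option.some.inj h).symm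
      obtain ⟨hfl, hfv, _⟩ := PySem.List.getElem_of_index?_eq_some hf
      obtain ⟨hkl, hkv, _⟩ := PySem.List.getElem_of_index?_eq_some hk
      have hkl' : first + 1 + k < ns.length := by
        have := hkl; simp [List.length_drop] at this; omega
      have hcv : ns[first + 1 + k]'hkl' = seg := by
        rw [← hkv]
        exact (List.getElem_drop ..).symm
      refine ⟨by omega, first, by omega, ?_⟩
      rw [hc, List.getElem?_eq_getElem hfl, List.getElem?_eq_getElem hkl', hfv, hcv]

-- every repeat position dominates some candidate of B
theorem rep_cand (ns : List String) (j : Nat) (h : pvRep ns j) :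
    ∃ c, c ∈ (PySem.List.dedup ns).filterMap (pvSecondOcc ns) ∧ c ≤ j := by
  obtain ⟨hj, i, hij, hget⟩ := h
  have hi : i < ns.length := by omega
  set seg := ns[j]'hj with hseg
  have hiv : ns[i]'hi = seg := by
    rw [List.getElem?_eq_getElem hi, List.getElem?_eq_getElem hj] at hget
    exact Option.some.inj hget
  have hmem : seg ∈ ns := List.getElem_mem hj
  have hf : (PySem.List.index? ns seg).isSome = true := (PySem.List.index?_isSome_iff ns seg).mpr hmem
  obtain ⟨first, hf⟩ := Option.isSome_iff_exists.mp hf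
  obtain ⟨hfl, hfv, hfmin⟩ := PySem.List.getElem_of_index?_eq_some hf
  have hfi : first ≤ i := by
    by_contra hcon
    exact hfmin i (by omega) hiv
  have hrl : j - (first + 1) < (ns.drop (first + 1)).length := by
    simp [List.length_drop]; omega
  have hrv' : (ns.drop (first + 1))[j - (first + 1)]? = some seg := by
    rw [List.getElem?_drop]
    have h1 : first + 1 + (j - (first + 1)) = j := by omega
    rw [h1, List.getElem?_eq_getElem hj]
  have hrv : (ns.drop (first + 1))[j - (first + 1)]'hrl = seg := by
    have := List.getElem?_eq_getElem hrl
    rw [hrv'] at this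
    exact (Option.some.inj this).symm
  have hrmem : seg ∈ ns.drop (first + 1) := by
    rw [← hrv]; exact List.getElem_mem hrl
  have hk : (PySem.List.index? (ns.drop (first + 1)) seg).isSome = true :=
    (PySem.List.index?_isSome_iff _ seg).mpr hrmem
  obtain ⟨k, hk⟩ := Option.isSome_iff_exists.mp hk
  obtain ⟨hkl, hkv, hkmin⟩ := PySem.List.getElem_of_index?_eq_some hk
  have hkle : k ≤ j - (first + 1) := by
    by_contra hcon
    exact hkmin (j - (first + 1)) (by omega) hrv
  refine ⟨first + 1 + k, ?_, by omega⟩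
  refine List.mem_filterMap.mpr ⟨seg, (PySem.List.mem_dedup ns seg).mpr hmem, ?_⟩
  unfold pvSecondOcc
  simp only [hf, slice_succ_drop, hk]

-- ===== VERDICT (by name: the statement is the Claim_ definition above) =====
theorem first_repeated_namespace_segment_py_spec : Claim_equal_first_repeated_namespace_segment_py := by
  intro ns _
  unfold Spec_first_repeated_namespace_segment_py first_repeated_namespace_segment_py
    first_repeated_namespace_segment_py_alt
  rw [pvGoA_eq_pvScan ns ns 0 PySem.Dict.empty (by simp)
    (fun s => by simp [PySem.Dict.get?_empty])
    (fun s p hp => by rw [PySem.Dict.get?_empty] at hp; cases hp)]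
  cases hmin : PySem.List.min? ((PySem.List.dedup ns).filterMap (pvSecondOcc ns)) (fun x => x) with
  | none =>
    have hnil := (PySem.List.min?_eq_none_iff _ _).mp hmin
    simp only [hmin]
    refine pvScan_none ns ns 0 (by simp) ?_
    intro j _ hrep
    obtain ⟨c, hc, _⟩ := rep_cand ns j hrep
    rw [hnil] at hc
    cases hc
  | some c =>
    have hcmem := PySem.List.min?_mem hmin
    obtain ⟨seg, _, hsec⟩ := List.mem_filterMap.mp hcmem
    have hrep : pvRep ns c := cand_rep ns seg c hsec
    have hclt : c < ns.length := hrep.1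
    have hminimal : ∀ m, 0 ≤ m → m < c → ¬ pvRep ns m := by
      intro m _ hmc hrepm
      obtain ⟨c', hc'mem, hc'le⟩ := rep_cand ns m hrepm
      have := PySem.List.min?_isMin hmin c' hc'mem
      simp at this
      omega
    rw [pvScan_some ns ns 0 c hclt (by simp) (by omega) hrep hminimal]
    simp only [hmin, PySem.List.pyGet?_natCast, List.getElem?_eq_getElem hclt]
    have hslice : PySem.List.slice ns none (some ((c : Int) + 1)) = ns.take (c + 1) := by
      have : ((c : Int) + 1) = ((c + 1 : Nat) : Int) := by push_cast; ring
      rw [this, PySem.List.slice_to_natCast]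
    rw [hslice]
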